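-- pv_equiv track=rewrite | github.com/ShreyaKunda/Agentic-AI-GCP | src/utils/cve_report.py | break_long_words
-- ===== SOURCE A (Python) =====
-- def break_long_words(text: str, max_len: int = 80) -> str:
--     """
--     Insert soft breaks in very long tokens (URLs or long words) so FPDF's multi_cell can wrap.
--     We'll insert zero-width space characters (or spaces) for wrapping.
--     """
--     if not text:
--         return text
--     parts = []
--     for token in text.split(" "):
--         if len(token) <= max_len:
--             parts.append(token)
--         else:
--             # break into chunks and join with a zero-width space (ZWSP) or simple space
--             chunks = [token[i:i+max_len] for i in range(0, len(token), max_len)]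
--             parts.append(" ".join(chunks))
--     return " ".join(parts)
-- ===== SOURCE B (Python) =====
-- def break_long_words(text: str, max_len: int = 80) -> str:
--     """One-pass scan: insert a space before any character that would extend a
--     run of max_len consecutive non-space characters; the run counter resets on
--     each literal space."""
--     if not text:
--         return text
--     out = []
--     run = 0
--     for ch in text:
--         if ch == " ":
--             run = 0
--         else:
--             if run == max_len:
--                 out.append(" ")
--                 run = 0
--             run += 1
--         out.append(ch)
--     return "".join(out)
-- ===== Notes on version B (the rewrite author's own statement) =====
-- stated objective: alternative
-- what changed: Replaces the split-on-space / per-token chunk-comprehension / join pipeline with a single character-by-character pass that keeps a counter of the current run of non-space characters and emits a break space whenever the run would exceed max_len.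
-- outside the precondition, e.g. on break_long_words('ab', -1): A returns '', B returns 'ab'; on break_long_words('ab', 0): A raises ValueError, B returns ' ab'
import Mathlib
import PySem

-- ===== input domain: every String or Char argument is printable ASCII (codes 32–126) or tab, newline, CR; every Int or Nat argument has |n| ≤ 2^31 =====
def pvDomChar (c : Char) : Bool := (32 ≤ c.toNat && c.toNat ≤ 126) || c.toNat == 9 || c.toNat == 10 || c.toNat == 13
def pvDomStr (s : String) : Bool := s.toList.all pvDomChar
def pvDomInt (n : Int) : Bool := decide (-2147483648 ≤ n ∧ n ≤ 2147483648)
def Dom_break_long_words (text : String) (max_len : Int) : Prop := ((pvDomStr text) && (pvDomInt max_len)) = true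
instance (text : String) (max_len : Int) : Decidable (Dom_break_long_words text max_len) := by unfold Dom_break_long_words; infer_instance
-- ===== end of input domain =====

-- B replaces A's split(" ") / per-token chunking / join by one left-to-right scan with a
-- run counter (objective: alternative decomposition, same asymptotic cost).

-- ===== PORT A =====
-- A: split on " ", keep short tokens, chunk long tokens via [token[i:i+max_len] for i in range(0, len(token), max_len)], join everything with " ".
def break_long_words (text : String) (max_len : Int) : String :=
  if text = "" then text
  else
    let parts : List (List Char) :=
      (PySem.Chars.splitOn text.toList [' ']).foldl (fun parts token =>
        if (token.length : Int) ≤ max_len then parts ++ [token]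
        else
          let chunks := (PySem.List.pyRange 0 (token.length : Int) max_len).map
            (fun i => PySem.List.slice token (some i) (some (i + max_len)))
          parts ++ [PySem.Chars.join [' '] chunks]) []
    String.ofList (PySem.Chars.join [' '] parts)

-- ===== PORT B =====
-- B: one pass over the characters, run counter of consecutive non-space chars.
def break_long_words_alt (text : String) (max_len : Int) : String :=
  if text = "" then text
  else
    String.ofList
      (text.toList.foldl (fun (st : List Char × Int) ch =>
        if ch = ' ' then (st.1 ++ [ch], 0)
        else if st.2 = max_len then (st.1 ++ [' ', ch], 1)
        else (st.1 ++ [ch], st.2 + 1)) ([], 0)).1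

-- ===== PRECONDITION & SPEC =====
-- Pre_ restricts to the natural domain of a chunk width: for max_len = 0 A raises
-- ValueError (range step 0) on any text with a non-space character, and for negative
-- max_len A is outside its intended use (it silently replaces every token by an empty string).
def Pre_break_long_words (text : String) (max_len : Int) : Prop := 1 ≤ max_len
instance (text : String) (max_len : Int) : Decidable (Pre_break_long_words text max_len) := by unfold Pre_break_long_words; infer_instance

def pvWitness_break_long_words : String × Int := ("a url-like tokenxyz here", 5)

def Spec_break_long_words (text : String) (max_len : Int) (out : String) : Prop := out = break_long_words_alt text max_len
instance (text : String) (max_len : Int) (out : String) : Decidable (Spec_break_long_words text max_len out) := by unfold Spec_break_long_words; infer_instance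

-- ===== CLAIM (what is proved, stated in full; the proofs are below) =====
def Claim_equal_break_long_words : Prop := ∀ (text : String) (max_len : Int), Dom_break_long_words text max_len → Pre_break_long_words text max_len → Spec_break_long_words text max_len (break_long_words text max_len)

-- ===== LEMMAS AND PROOFS =====

-- proof-side model of B's scan (emitted characters, given the current run counter)
def bgo (m : Int) : List Char → Int → List Char
  | [], _ => []
  | c :: cs, r =>
    if c = ' ' then c :: bgo m cs 0
    else if r = m then ' ' :: c :: bgo m cs 1
    else c :: bgo m cs (r + 1)

-- proof-side model of A's per-token chunking
def chunkJoin (m : Int) (t : List Char) : List Char :=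
  if (t.length : Int) ≤ m ∨ m ≤ 0 then t
  else t.take m.toNat ++ ' ' :: chunkJoin m (t.drop m.toNat)
termination_by t.length
decreasing_by
  simp only [not_or, not_le] at *
  simp [List.length_drop]; omega

-- proof-side model of split(" ")
def mySplit (pre : List Char) : List Char → List (List Char)
  | [] => [pre]
  | c :: rest => if c = ' ' then pre :: mySplit [] rest else mySplit (pre ++ [c]) rest

theorem foldlB_spec (m : Int) : ∀ (cs : List Char) (acc : List Char) (r : Int),
    (cs.foldl (fun (st : List Char × Int) ch =>
      if ch = ' ' then (st.1 ++ [ch], 0)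
      else if st.2 = m then (st.1 ++ [' ', ch], 1)
      else (st.1 ++ [ch], st.2 + 1)) (acc, r)).1 = acc ++ bgo m cs r := by
  intro cs
  induction cs with
  | nil => intro acc r; simp [bgo]
  | cons c cs ih =>
    intro acc r
    simp only [List.foldl_cons, bgo]
    split_ifs <;> simp [ih]

theorem go_spec (fuel : Nat) : ∀ (l cur : List Char) (acc : List (List Char)),
    l.length ≤ fuel →
    PySem.Chars.splitOn.go [' '] fuel l cur acc = acc.reverse ++ mySplit cur.reverse l := by
  induction fuel with
  | zero =>
    intro l cur acc h
    have : l = [] := by cases l <;> simp_all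
    subst this
    simp [PySem.Chars.splitOn.go, mySplit]
  | succ fuel ih =>
    intro l cur acc h
    cases l with
    | nil => simp [PySem.Chars.splitOn.go, mySplit]
    | cons c rest =>
      simp only [PySem.Chars.splitOn.go, mySplit]
      by_cases hc : c = ' '
      · subst hc
        rw [if_pos (by simp), if_pos rfl]
        have := ih (List.drop [' '].length (' ' :: rest)) [] (cur.reverse :: acc)
          (by simp at h ⊢; omega)
        rw [this]
        simp
      · rw [if_neg (by simp; exact fun h' => hc h'.symm), if_neg hc]
        rw [ih rest (c :: cur) acc (by simp at h ⊢; omega)]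
        simp

theorem splitOn_eq_mySplit (cs : List Char) :
    PySem.Chars.splitOn cs [' '] = mySplit [] cs := by
  unfold PySem.Chars.splitOn
  simpa using go_spec (cs.length + 1) cs [] [] (by omega)

theorem mySplit_ne_nil (l : List Char) : ∀ (pre : List Char), mySplit pre l ≠ [] := by
  induction l with
  | nil => intro pre; simp [mySplit]
  | cons c rest ih =>
    intro pre
    simp only [mySplit]
    split_ifs <;> simp [ih]

theorem mySplit_noSpace (l : List Char) : ∀ (pre : List Char), (' ' ∉ pre) →
    ∀ t ∈ mySplit pre l, ' ' ∉ t := by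
  induction l with
  | nil => intro pre hpre t ht; simp [mySplit] at ht; subst ht; exact hpre
  | cons c rest ih =>
    intro pre hpre t ht
    simp only [mySplit] at ht
    by_cases hc : c = ' '
    · rw [if_pos hc] at ht
      rcases List.mem_cons.1 ht with h | h
      · subst h; exact hpre
      · exact ih [] (by simp) t h
    · rw [if_neg hc] at ht
      exact ih (pre ++ [c]) (by simp [hpre]; exact fun h => hc h.symm) t ht

theorem join_mySplit (l : List Char) : ∀ (pre : List Char),
    PySem.Chars.join [' '] (mySplit pre l) = pre ++ l := by
  induction l with
  | nil => intro pre; simp [mySplit, PySem.Chars.join_singleton]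
  | cons c rest ih =>
    intro pre
    simp only [mySplit]
    by_cases hc : c = ' '
    · rw [if_pos hc]
      obtain ⟨q, tl, hq⟩ : ∃ q tl, mySplit ([] : List Char) rest = q :: tl := by
        cases h : mySplit ([] : List Char) rest with
        | nil => exact absurd h (mySplit_ne_nil rest [])
        | cons q tl => exact ⟨q, tl, rfl⟩
      rw [hq, PySem.Chars.join_cons_cons, ← hq, ih]
      simp [hc]
    · rw [if_neg hc, ih]
      simp

theorem join_cons (p : List Char) (tl : List (List Char)) :
    PySem.Chars.join [' '] (p :: tl)
      = p ++ (if tl = [] then [] else ' ' :: PySem.Chars.join [' '] tl) := by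
  cases tl with
  | nil => simp [PySem.Chars.join_singleton]
  | cons q rest => simp [PySem.Chars.join_cons_cons]

theorem bgo_restart (m : Int) (rest : List Char) (r : Int)
    (h : rest = [] ∨ rest.head? = some ' ') : bgo m rest r = bgo m rest 0 := by
  rcases h with h | h
  · subst h; rfl
  · cases rest with
    | nil => rfl
    | cons c cs => simp at h; subst h; simp [bgo]

theorem bgo_noBreak (m : Int) : ∀ (t rest : List Char) (r : Int),
    (∀ c ∈ t, c ≠ ' ') → 0 ≤ r → r + (t.length : Int) ≤ m →
    bgo m (t ++ rest) r = t ++ bgo m rest (r + (t.length : Int)) := by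
  intro t
  induction t with
  | nil => intro rest r _ _ _; simp
  | cons c cs ih =>
    intro rest r hns hr hlen
    simp only [List.cons_append, bgo]
    rw [if_neg (hns c (by simp)), if_neg (by simp at hlen; omega)]
    rw [ih rest (r + 1) (fun d hd => hns d (by simp [hd])) (by omega) (by simp at hlen ⊢; omega)]
    simp only [List.length_cons]
    push_cast
    ring_nf

theorem bgo_chunk (m : Int) (hm : 1 ≤ m) : ∀ (n : Nat) (t rest : List Char),
    t.length ≤ n → (∀ c ∈ t, c ≠ ' ') → (rest = [] ∨ rest.head? = some ' ') →
    bgo m (t ++ rest) 0 = chunkJoin m t ++ bgo m rest 0 := by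
  intro n
  induction n with
  | zero =>
    intro t rest hlen _ _
    have : t = [] := by cases t <;> simp_all
    subst this
    rw [chunkJoin, if_pos (by norm_num; omega)]
    simp
  | succ n ih =>
    intro t rest hlen hns hrest
    by_cases hshort : (t.length : Int) ≤ m
    · rw [bgo_noBreak m t rest 0 hns le_rfl (by omega)]
      rw [chunkJoin, if_pos (Or.inl hshort)]
      rw [bgo_restart m rest _ hrest]
    · -- long token
      have hmnat : (m.toNat : Int) = m := by omega
      have hm1 : 1 ≤ m.toNat := by omega
      have hlt : m.toNat < t.length := by omega
      have hsplit : t = t.take m.toNat ++ t.drop m.toNat := (List.take_append_drop _ t).symm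
      have htake_len : (t.take m.toNat).length = m.toNat := by simp; omega
      conv_lhs => rw [hsplit]
      rw [List.append_assoc]
      rw [bgo_noBreak m (t.take m.toNat) _ 0
        (fun c hc => hns c (List.mem_of_mem_take hc)) le_rfl (by rw [htake_len]; omega)]
      rw [htake_len, hmnat]
      -- bgo (drop ++ rest) m = ' ' :: bgo (drop ++ rest) 0
      obtain ⟨d, ds, hd⟩ : ∃ d ds, t.drop m.toNat = d :: ds := by
        cases h : t.drop m.toNat with
        | nil => exfalso; have := List.length_drop (l := t) (i := m.toNat); rw [h] at this; simp at this; omega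
        | cons d ds => exact ⟨d, ds, rfl⟩
      have hdns : d ≠ ' ' := by
        have : d ∈ t := by
          have : d ∈ t.drop m.toNat := by simp [hd]
          exact List.mem_of_mem_drop this
        exact hns d this
      have hstep : bgo m (t.drop m.toNat ++ rest) (0 + (m.toNat:Int)) = ' ' :: bgo m (t.drop m.toNat ++ rest) 0 := by
        rw [hd]
        simp only [List.cons_append, bgo]
        rw [if_neg hdns, if_neg hdns, if_pos (by omega), if_neg (by omega)]
        norm_num
      rw [hmnat] at hstep
      rw [hstep]
      rw [ih (t.drop m.toNat) rest (by simp; omega)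
        (fun c hc => hns c (List.mem_of_mem_drop hc)) hrest]
      conv_rhs => rw [chunkJoin, if_neg (by omega)]
      simp

theorem bgo_join (m : Int) (hm : 1 ≤ m) : ∀ (tokens : List (List Char)),
    tokens ≠ [] → (∀ t ∈ tokens, ∀ c ∈ t, c ≠ ' ') →
    bgo m (PySem.Chars.join [' '] tokens) 0
      = PySem.Chars.join [' '] (tokens.map (chunkJoin m)) := by
  intro tokens
  induction tokens with
  | nil => intro h _; exact absurd rfl h
  | cons t tl ih =>
    intro _ hns
    cases tl with
    | nil =>
      simp only [PySem.Chars.join_singleton, List.map]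
      have := bgo_chunk m hm t.length t [] le_rfl (fun c hc => hns t (by simp) c hc) (Or.inl rfl)
      simpa [bgo, PySem.Chars.join_singleton] using this
    | cons q r =>
      rw [PySem.Chars.join_cons_cons]
      simp only [List.map]
      rw [PySem.Chars.join_cons_cons]
      rw [List.append_assoc]
      have hjoin_shape : (([' '] : List Char) ++ PySem.Chars.join [' '] (q :: r)) = ' ' :: PySem.Chars.join [' '] (q :: r) := rfl
      rw [hjoin_shape]
      rw [bgo_chunk m hm t.length t _ le_rfl (fun c hc => hns t (by simp) c hc) (Or.inr rfl)]
      have : bgo m (' ' :: PySem.Chars.join [' '] (q :: r)) 0 = ' ' :: bgo m (PySem.Chars.join [' '] (q :: r)) 0 := by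
        simp [bgo]
      rw [this, ih (by simp) (fun t' ht' => hns t' (by simp [ht']))]
      simp

theorem pyRange_pos_cons (a b : Int) {s : Int} (hs : 0 < s) (hab : a < b) :
    PySem.List.pyRange a b s = a :: PySem.List.pyRange (a + s) b s := by
  rw [PySem.List.pyRange_of_pos _ _ hs, PySem.List.pyRange_of_pos _ _ hs]
  have hcnt : (if a < b then ((b - a + s - 1) / s).toNat else 0)
      = (if a + s < b then ((b - (a + s) + s - 1) / s).toNat else 0) + 1 := by
    rw [if_pos hab]
    by_cases h2 : a + s < b
    · rw [if_pos h2]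
      have : b - a + s - 1 = (b - (a + s) + s - 1) + 1 * s := by ring
      rw [this, Int.add_mul_ediv_right _ _ (by omega)]
      have hnn : 0 ≤ (b - (a + s) + s - 1) / s := Int.ediv_nonneg (by omega) (by omega)
      omega
    · rw [if_neg h2]
      have h1 : (b - a + s - 1) / s = 1 := by
        have : b - a + s - 1 = (b - a - 1) + 1 * s := by ring
        rw [this, Int.add_mul_ediv_right _ _ (by omega)]
        have : (b - a - 1) / s = 0 := Int.ediv_eq_zero_of_lt (by omega) (by omega)
        omega
      rw [h1]; rfl
  rw [hcnt, List.range_succ_eq_map]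
  simp only [List.map_cons, List.map_map]
  congr 1
  · simp
  · apply List.map_congr_left
    intro k _
    simp [Function.comp]
    ring

theorem pyRange_pos_nil {a b s : Int} (hs : 0 < s) (hba : b ≤ a) :
    PySem.List.pyRange a b s = [] := by
  rw [PySem.List.pyRange_of_pos _ _ hs, if_neg (by omega)]
  simp

theorem pyRange_shift {b s : Int} (hs : 0 < s) :
    PySem.List.pyRange s b s = (PySem.List.pyRange 0 (b - s) s).map (· + s) := by
  rw [PySem.List.pyRange_of_pos _ _ hs, PySem.List.pyRange_of_pos _ _ hs, List.map_map]
  have : (if s < b then ((b - s + s - 1) / s).toNat else 0)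
      = (if 0 < b - s then ((b - s - 0 + s - 1) / s).toNat else 0) := by
    by_cases h : s < b <;> simp [h]
  rw [this]
  apply List.map_congr_left
  intro k _
  simp [Function.comp]
  ring

theorem aj_eq (m : Int) (hm : 1 ≤ m) : ∀ (n : Nat) (t : List Char), t.length ≤ n → 0 < t.length →
    PySem.Chars.join [' ']
       ((PySem.List.pyRange 0 (t.length : Int) m).map
         (fun i => PySem.List.slice t (some i) (some (i + m))))
    = chunkJoin m t := by
  intro n
  induction n with
  | zero => intro t hlen hpos; omega
  | succ n ih =>
    intro t hlen hpos
    have hmnat : (m.toNat : Int) = m := by omega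
    have hhead : PySem.List.slice t (some 0) (some (0 + m)) = t.take m.toNat := by
      rw [zero_add, PySem.List.slice_zero_start, PySem.List.slice_to _ (by omega)]
    by_cases hshort : (t.length : Int) ≤ m
    · -- single chunk
      rw [pyRange_pos_cons 0 _ (by omega) (by omega),
          pyRange_pos_nil (by omega) (by omega)]
      simp only [zero_add, List.map_cons, List.map_nil]
      rw [PySem.Chars.join_singleton]
      rw [show PySem.List.slice t (some 0) (some m) = t.take m.toNat from by
        rw [PySem.List.slice_zero_start, PySem.List.slice_to _ (by omega)]]
      rw [List.take_of_length_le (by omega)]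
      rw [chunkJoin, if_pos (Or.inl hshort)]
    · have hlt : m.toNat < t.length := by omega
      rw [pyRange_pos_cons 0 _ (by omega) (by omega)]
      simp only [zero_add]
      rw [pyRange_shift (by omega)]
      simp only [List.map_cons, List.map_map]
      have htail : (PySem.List.pyRange 0 ((t.length : Int) - m) m).map
            ((fun i => PySem.List.slice t (some i) (some (i + m))) ∘ (· + m))
          = (PySem.List.pyRange 0 (((t.drop m.toNat).length : Int)) m).map
            (fun i => PySem.List.slice (t.drop m.toNat) (some i) (some (i + m))) := by
        have hdl : (((t.drop m.toNat).length : Int)) = (t.length : Int) - m := by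
          simp [List.length_drop]; omega
        rw [hdl]
        apply List.map_congr_left
        intro i hi
        have hi0 : 0 ≤ i := ((PySem.List.mem_pyRange_iff_of_pos (by omega) i).1 hi).1
        simp only [Function.comp]
        rw [PySem.List.slice_toNat _ (by omega) (by omega), PySem.List.slice_toNat _ (by omega) (by omega)]
        rw [List.drop_drop]
        congr 1
        · omega
        · congr 1
          omega
      rw [htail, hhead]
      rw [join_cons]
      have hdpos : 0 < (t.drop m.toNat).length := by
        rw [List.length_drop]; omega
      have hne : (PySem.List.pyRange 0 (((t.drop m.toNat).length : Int)) m).map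
            (fun i => PySem.List.slice (t.drop m.toNat) (some i) (some (i + m))) ≠ [] := by
        rw [pyRange_pos_cons 0 _ (by omega) (by exact_mod_cast hdpos)]
        simp
      rw [if_neg hne]
      rw [ih (t.drop m.toNat) (by rw [List.length_drop]; omega) hdpos]
      conv_rhs => rw [chunkJoin]
      rw [if_neg (by omega)]

theorem proc_eq_chunkJoin (m : Int) (hm : 1 ≤ m) (t : List Char) :
    (if (t.length : Int) ≤ m then t
     else PySem.Chars.join [' ']
       ((PySem.List.pyRange 0 (t.length : Int) m).map
         (fun i => PySem.List.slice t (some i) (some (i + m)))))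
    = chunkJoin m t := by
  by_cases hshort : (t.length : Int) ≤ m
  · rw [if_pos hshort, chunkJoin, if_pos (Or.inl hshort)]
  · rw [if_neg hshort]
    exact aj_eq m hm t.length t le_rfl (by omega)

-- ===== VERDICT (by name: the statement is the Claim_ definition above) =====
theorem break_long_words_spec : Claim_equal_break_long_words := by
  intro text m _dom hm
  unfold Spec_break_long_words break_long_words break_long_words_alt
  by_cases hempty : text = ""
  · simp [hempty]
  · simp only [if_neg hempty]
    rw [foldlB_spec m text.toList [] 0, splitOn_eq_mySplit]
    congr 1
    rw [show (fun (parts : List (List Char)) (token : List Char) =>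
          if (token.length : Int) ≤ m then parts ++ [token]
          else
            parts ++ [PySem.Chars.join [' ']
              ((PySem.List.pyRange 0 (token.length : Int) m).map
                (fun i => PySem.List.slice token (some i) (some (i + m))))])
        = fun (parts : List (List Char)) (token : List Char) => parts ++
            [if (token.length : Int) ≤ m then token
             else PySem.Chars.join [' ']
              ((PySem.List.pyRange 0 (token.length : Int) m).map
                (fun i => PySem.List.slice token (some i) (some (i + m))))]
      from by funext parts token; split_ifs <;> rfl]
    rw [PySem.List.foldl_append_singleton_eq_map]
    simp only [List.nil_append]
    conv_rhs => rw [show text.toList = PySem.Chars.join [' '] (mySplit [] text.toList) from by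
      rw [join_mySplit]; simp]
    rw [bgo_join m hm _ (mySplit_ne_nil _ _) (fun t ht c hc => by
      have := mySplit_noSpace text.toList [] (by simp) t ht
      exact fun h => this (h ▸ hc))]
    congr 1
    apply List.map_congr_left
    intro t _
    exact proc_eq_chunkJoin m hm t
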